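-- pv_equiv track=rewrite | github.com/jdanray/leetcode | removeSubstring.py | removeSubstring
-- ===== SOURCE A (Python) =====
-- def removeSubstring(s, k):
-- 	stack = []
-- 	for c in s:
-- 		if stack and stack[-1][0] == c:
-- 			_, n = stack.pop()
-- 			stack.append((c, n + 1))
-- 		else:
-- 			stack.append((c, 1))
--
-- 		if len(stack) > 1 and stack[-1] == (')', k) and stack[-2][0] == '(' and stack[-2][1] >= k:
-- 			stack.pop()
-- 			_, n2 = stack.pop()
-- 			if n2 > k:
-- 				stack.append(('(', n2 - k))
--
-- 	return ''.join(c * n for (c, n) in stack)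
-- ===== SOURCE B (Python) =====
-- def removeSubstring(s, k):
--     stack = []
--     for c in s:
--         stack.append(c)
--         if c == ')':
--             run = 0
--             while run < len(stack) and stack[len(stack) - 1 - run] == ')':
--                 run += 1
--             below = len(stack) - run
--             if run == k and below >= k and all(ch == '(' for ch in stack[below - k:below]):
--                 del stack[below - k:]
--     return ''.join(stack)
-- ===== Notes on version B (the rewrite author's own statement) =====
-- stated objective: idiomatic
-- what changed: B keeps a plain character stack and, after pushing a ')', counts the trailing ')' run and scans the k characters below for '(' before deleting 2k characters, instead of A's run-length-encoded (char,count) stack with run merging/splitting.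
import Mathlib
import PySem

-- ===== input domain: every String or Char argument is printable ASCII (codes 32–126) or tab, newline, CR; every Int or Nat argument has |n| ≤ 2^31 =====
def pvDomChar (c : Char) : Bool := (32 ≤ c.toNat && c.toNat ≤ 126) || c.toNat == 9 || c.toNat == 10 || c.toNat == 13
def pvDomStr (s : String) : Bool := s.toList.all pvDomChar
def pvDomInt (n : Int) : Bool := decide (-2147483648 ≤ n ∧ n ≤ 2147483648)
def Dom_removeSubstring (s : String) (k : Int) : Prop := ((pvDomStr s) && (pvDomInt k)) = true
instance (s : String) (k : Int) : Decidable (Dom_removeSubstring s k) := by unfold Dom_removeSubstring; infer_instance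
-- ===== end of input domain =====

-- B replaces A's run-length-encoded (char,count) stack by a plain character stack with a
-- trailing-run count and a scan of the k characters below; same return value, different data structure.

-- ===== PORT A =====
-- A's stack has its top at the HEAD of the list (Python's end-of-list top).
def pushA (st : List (Char × Int)) (c : Char) : List (Char × Int) :=
  match st with
  | (c0, n) :: rest => if c0 = c then (c, n + 1) :: rest else (c, 1) :: (c0, n) :: rest
  | [] => [(c, 1)]

def checkA (k : Int) (st : List (Char × Int)) : List (Char × Int) :=
  match st with
  | (c1, n1) :: (c2, n2) :: rest =>
    if c1 = ')' ∧ n1 = k ∧ c2 = '(' ∧ k ≤ n2 then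
      if k < n2 then ('(', n2 - k) :: rest else rest
    else (c1, n1) :: (c2, n2) :: rest
  | other => other

def stepA (k : Int) (st : List (Char × Int)) (c : Char) : List (Char × Int) :=
  checkA k (pushA st c)

def removeSubstring (s : String) (k : Int) : String :=
  String.mk (((s.toList.foldl (stepA k) []).reverse).flatMap
    (fun p => List.replicate p.2.toNat p.1))

-- ===== PORT B =====
-- number of leading ')' characters (the trailing run of the Python stack; top = head here)
def countClose : List Char → Nat
  | [] => 0
  | a :: t => if a = ')' then countClose t + 1 else 0

def stepB (k : Int) (st : List Char) (c : Char) : List Char :=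
  let st1 := c :: st
  if c = ')' then
    let run := countClose st1
    let below := st1.drop run
    if (run : Int) = k ∧ k ≤ (below.length : Int) ∧ (below.take k.toNat).all (· = '(')
    then below.drop k.toNat
    else st1
  else st1

def removeSubstring_alt (s : String) (k : Int) : String :=
  String.mk ((s.toList.foldl (stepB k) []).reverse)

-- ===== PRECONDITION & SPEC =====
def Spec_removeSubstring (s : String) (k : Int) (out : String) : Prop := out = removeSubstring_alt s k
instance (s : String) (k : Int) (out : String) : Decidable (Spec_removeSubstring s k out) := by unfold Spec_removeSubstring; infer_instance

-- ===== CLAIM (what is proved, stated in full; the proofs are below) =====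
def Claim_equal_removeSubstring : Prop := ∀ (s : String) (k : Int), Dom_removeSubstring s k → Spec_removeSubstring s k (removeSubstring s k)

-- ===== LEMMAS AND PROOFS =====

def flat (st : List (Char × Int)) : List Char :=
  st.flatMap (fun p => List.replicate p.2.toNat p.1)

/-- well-formedness of A's run-length stack: positive counts, adjacent runs of distinct chars -/
def WFA (st : List (Char × Int)) : Prop :=
  st.IsChain (fun p q => p.1 ≠ q.1) ∧ ∀ p ∈ st, 1 ≤ p.2

lemma flat_cons (c : Char) (n : Int) (r : List (Char × Int)) :
    flat ((c, n) :: r) = List.replicate n.toNat c ++ flat r := by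
  simp [flat]

lemma countClose_repl (n : Nat) (l : List Char) (hl : countClose l = 0) :
    countClose (List.replicate n ')' ++ l) = n := by
  induction n with
  | zero => simpa
  | succ m ih => simp [List.replicate_succ, countClose, ih]

lemma flat_cons_pos (c2 : Char) (n2 : Int) (r : List (Char × Int)) (h : 1 ≤ n2) :
    ∃ m, n2.toNat = m + 1 ∧ flat ((c2, n2) :: r) = c2 :: (List.replicate m c2 ++ flat r) := by
  refine ⟨n2.toNat - 1, by omega, ?_⟩
  rw [flat_cons]
  have hm : n2.toNat = (n2.toNat - 1) + 1 := by omega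
  conv_lhs => rw [hm]
  rw [List.replicate_succ, List.cons_append]

lemma countClose_flat_zero (st : List (Char × Int)) (h2 : ∀ p ∈ st, 1 ≤ p.2)
    (hc : ∀ p ∈ st.head?, p.1 ≠ ')') : countClose (flat st) = 0 := by
  cases st with
  | nil => rfl
  | cons p r =>
    obtain ⟨c2, n2⟩ := p
    obtain ⟨m, hm, he⟩ := flat_cons_pos c2 n2 r (h2 (c2, n2) (by simp))
    rw [he]
    have hne : c2 ≠ ')' := hc (c2, n2) (by simp)
    simp [countClose, hne]

lemma push_spec (st : List (Char × Int)) (c : Char) (h : WFA st) :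
    ∃ n rest', pushA st c = (c, n) :: rest' ∧ 1 ≤ n ∧ WFA ((c, n) :: rest') ∧
      flat ((c, n) :: rest') = c :: flat st := by
  obtain ⟨hch, hpos⟩ := h
  cases st with
  | nil =>
    refine ⟨1, [], rfl, le_refl 1, ⟨by simp, by simp⟩, ?_⟩
    rw [flat_cons]; simp
  | cons p rest =>
    obtain ⟨c0, n0⟩ := p
    have h1 : 1 ≤ n0 := hpos (c0, n0) (by simp)
    by_cases hc0 : c0 = c
    · refine ⟨n0 + 1, rest, by simp [pushA, hc0], by omega, ⟨?_, ?_⟩, ?_⟩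
      · subst hc0
        cases rest with
        | nil => simp
        | cons q r' =>
          rw [List.isChain_cons_cons] at hch ⊢
          exact ⟨hch.1, hch.2⟩
      · intro p hp
        rcases List.mem_cons.mp hp with h | h
        · subst h; simp; omega
        · exact hpos p (List.mem_cons_of_mem _ h)
      · subst hc0
        rw [flat_cons, flat_cons]
        rw [show (n0 + 1).toNat = n0.toNat + 1 from by omega, List.replicate_succ, List.cons_append]
    · refine ⟨1, (c0, n0) :: rest, by simp [pushA, hc0], le_refl 1, ⟨?_, ?_⟩, ?_⟩
      · rw [List.isChain_cons_cons]
        exact ⟨fun he => hc0 he.symm, hch⟩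
      · intro p hp
        rcases List.mem_cons.mp hp with h | h
        · subst h; norm_num
        · exact hpos p h
      · rw [flat_cons]; simp

lemma trigger_iff (k n2 : Int) (c2 : Char) (r : List (Char × Int))
    (hk : 1 ≤ k) (hn2 : 1 ≤ n2) (hrpos : ∀ p ∈ r, 1 ≤ p.2)
    (hhead : ∀ p ∈ r.head?, p.1 ≠ c2) :
    (k ≤ ((flat ((c2, n2) :: r)).length : Int) ∧
      ((flat ((c2, n2) :: r)).take k.toNat).all (· = '(') = true) ↔
    (c2 = '(' ∧ k ≤ n2) := by
  constructor
  · rintro ⟨hlen, hall⟩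
    obtain ⟨m2, hm2, he⟩ := flat_cons_pos c2 n2 r hn2
    obtain ⟨mk, hmk⟩ : ∃ mk, k.toNat = mk + 1 := ⟨k.toNat - 1, by omega⟩
    have hc2 : c2 = '(' := by
      rw [he, hmk] at hall
      simp only [List.take_succ_cons, List.all_cons, Bool.and_eq_true, decide_eq_true_eq] at hall
      exact hall.1
    refine ⟨hc2, ?_⟩
    by_contra hlt
    push_neg at hlt
    rw [flat_cons] at hlen hall
    simp only [List.length_append, List.length_replicate] at hlen
    push_cast at hlen
    have hfr : 1 ≤ (flat r).length := by omega
    cases r with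
    | nil =>
      rw [show flat ([] : List (Char × Int)) = [] from rfl] at hfr
      simp at hfr
    | cons q r2 =>
      obtain ⟨c4, n4⟩ := q
      obtain ⟨m4, hm4, he4⟩ := flat_cons_pos c4 n4 r2 (hrpos (c4, n4) (by simp))
      have hne4 : c4 ≠ c2 := hhead (c4, n4) (by simp)
      rw [he4, List.take_append] at hall
      have hd : k.toNat - (List.replicate n2.toNat c2).length = (k.toNat - n2.toNat - 1) + 1 := by
        simp only [List.length_replicate]; omega
      rw [hd, List.take_succ_cons] at hall
      simp only [List.all_append, List.all_cons, Bool.and_eq_true, decide_eq_true_eq] at hall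
      obtain ⟨-, hc4, -⟩ := hall
      exact hne4 (by rw [hc4, hc2])
  · rintro ⟨hc2, hkn2⟩
    subst hc2
    rw [flat_cons]
    constructor
    · simp only [List.length_append, List.length_replicate]
      push_cast
      omega
    · rw [List.take_append_of_le_length (by simp only [List.length_replicate]; omega),
        List.take_replicate]
      simp [List.all_eq_true, List.mem_replicate]

lemma step_sim (k : Int) (st : List (Char × Int)) (c : Char) (h : WFA st) :
    WFA (stepA k st c) ∧ stepB k (flat st) c = flat (stepA k st c) := by
  obtain ⟨n, rest', hpush, hn, hwf1, hflat1⟩ := push_spec st c h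
  unfold stepA
  rw [hpush]
  by_cases hcp : c = ')'
  · subst hcp
    obtain ⟨hch1, hpos1⟩ := hwf1
    have hz : countClose (flat rest') = 0 := by
      apply countClose_flat_zero
      · intro p hp; exact hpos1 p (List.mem_cons_of_mem _ hp)
      · intro p hp
        cases rest' with
        | nil => simp at hp
        | cons q r =>
          simp at hp; subst hp
          rw [List.isChain_cons_cons] at hch1
          exact fun hq => hch1.1 hq.symm
    have hrun : countClose (')' :: flat st) = n.toNat := by
      rw [show (')' :: flat st) = flat ((')', n) :: rest') from hflat1.symm, flat_cons]
      exact countClose_repl _ _ hz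
    have hdrop : (')' :: flat st).drop n.toNat = flat rest' := by
      rw [show (')' :: flat st) = flat ((')', n) :: rest') from hflat1.symm, flat_cons]
      simpa using List.drop_left (List.replicate n.toNat ')') (flat rest')
    have hB : stepB k (flat st) ')' =
        if ((n.toNat : Int) = k ∧ k ≤ ((flat rest').length : Int) ∧
            ((flat rest').take k.toNat).all (· = '(') = true)
        then (flat rest').drop k.toNat else flat ((')', n) :: rest') := by
      simp only [stepB]
      rw [if_pos trivial, hrun, hdrop, ← hflat1]
    rw [hB, show ((n.toNat : Int)) = n from by omega]
    by_cases hnk : n = k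
    · subst hnk
      cases rest' with
      | nil =>
        rw [if_neg (by
          rintro ⟨-, hlen, -⟩
          rw [show flat ([] : List (Char × Int)) = [] from rfl] at hlen
          simp at hlen; omega)]
        exact ⟨⟨hch1, hpos1⟩, rfl⟩
      | cons q r =>
        obtain ⟨c2, n2⟩ := q
        have hn2 : 1 ≤ n2 := hpos1 (c2, n2) (by simp)
        have hch2 : List.IsChain (fun p q : Char × Int => p.1 ≠ q.1) ((c2, n2) :: r) := by
          rw [List.isChain_cons_cons] at hch1; exact hch1.2
        have hrpos : ∀ p ∈ r, 1 ≤ p.2 := fun p hp => hpos1 p (by simp [hp])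
        have hhead : ∀ p ∈ r.head?, p.1 ≠ c2 := by
          intro p hp
          cases r with
          | nil => simp at hp
          | cons q2 r2 =>
            simp at hp; subst hp
            rw [List.isChain_cons_cons] at hch2
            exact fun hq => hch2.1 hq.symm
        have hiff := trigger_iff n n2 c2 r (by omega) hn2 hrpos hhead
        by_cases hA : c2 = '(' ∧ n ≤ n2
        · obtain ⟨hc2, hkn2⟩ := hA
          subst hc2
          rw [if_pos ⟨rfl, hiff.mpr ⟨rfl, hkn2⟩⟩]
          have hAval : checkA n ((')', n) :: ('(', n2) :: r) =
              if n < n2 then ('(', n2 - n) :: r else r := by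
            simp [checkA, hkn2]
          have hBval : (flat (('(', n2) :: r)).drop n.toNat =
              List.replicate (n2.toNat - n.toNat) '(' ++ flat r := by
            rw [flat_cons, List.drop_append, List.drop_replicate]
            simp only [List.length_replicate]
            rw [show n.toNat - n2.toNat = 0 from by omega, List.drop_zero]
          rw [hAval, hBval]
          by_cases hlt : n < n2
          · rw [if_pos hlt]
            refine ⟨⟨?_, ?_⟩, ?_⟩
            · cases r with
              | nil => simp
              | cons q2 r2 =>
                rw [List.isChain_cons_cons] at hch2 ⊢
                exact ⟨hch2.1, hch2.2⟩
            · intro p hp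
              rcases List.mem_cons.mp hp with h | h
              · subst h; simp; omega
              · exact hrpos p h
            · rw [flat_cons, show (n2 - n).toNat = n2.toNat - n.toNat from by omega]
          · rw [if_neg hlt]
            refine ⟨⟨?_, hrpos⟩, ?_⟩
            · cases r with
              | nil => exact List.IsChain.nil
              | cons q2 r2 => exact (List.isChain_cons_cons.mp hch2).2
            · rw [show n2.toNat - n.toNat = 0 from by omega]
              simp
        · rw [if_neg (by
            rintro ⟨-, h2, h3⟩
            exact hA (hiff.mp ⟨h2, h3⟩))]
          have hAval : checkA n ((')', n) :: (c2, n2) :: r) = (')', n) :: (c2, n2) :: r := by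
            simp only [checkA]
            rw [if_neg (by rintro ⟨-, -, h3, h4⟩; exact hA ⟨h3, h4⟩)]
          rw [hAval]
          exact ⟨⟨hch1, hpos1⟩, rfl⟩
    · rw [if_neg (by rintro ⟨h1, -⟩; exact hnk h1)]
      have hAval : checkA k ((')', n) :: rest') = (')', n) :: rest' := by
        cases rest' with
        | nil => rfl
        | cons q r =>
          obtain ⟨c2, n2⟩ := q
          simp only [checkA]
          rw [if_neg (by rintro ⟨-, h2, -, -⟩; exact hnk h2)]
      rw [hAval]
      exact ⟨⟨hch1, hpos1⟩, rfl⟩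
  · have hB : stepB k (flat st) c = c :: flat st := by simp [stepB, hcp]
    have hAval : checkA k ((c, n) :: rest') = (c, n) :: rest' := by
      cases rest' with
      | nil => rfl
      | cons q r =>
        obtain ⟨c2, n2⟩ := q
        simp only [checkA]
        rw [if_neg (by rintro ⟨h1, -⟩; exact hcp h1)]
    rw [hAval, hB]
    exact ⟨hwf1, hflat1.symm⟩

lemma fold_sim (k : Int) (l : List Char) (st : List (Char × Int)) (h : WFA st) :
    l.foldl (stepB k) (flat st) = flat (l.foldl (stepA k) st) := by
  induction l generalizing st with
  | nil => rfl
  | cons c t ih =>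
    obtain ⟨hw, he⟩ := step_sim k st c h
    simp only [List.foldl_cons, he]
    exact ih _ hw

lemma flat_reverse (st : List (Char × Int)) :
    (flat st).reverse = st.reverse.flatMap (fun p => List.replicate p.2.toNat p.1) := by
  induction st with
  | nil => rfl
  | cons p t ih =>
    show (List.replicate p.2.toNat p.1 ++ flat t).reverse = _
    rw [List.reverse_append, ih]
    simp [List.reverse_replicate, List.flatMap_append]

-- ===== VERDICT (by name: the statement is the Claim_ definition above) =====
theorem removeSubstring_spec : Claim_equal_removeSubstring := by
  intro s k _
  show _ = _
  unfold removeSubstring removeSubstring_alt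
  have h := fold_sim k s.toList [] ⟨List.IsChain.nil, by simp⟩
  rw [show flat [] = [] from rfl] at h
  rw [h]
  congr 1
  exact (flat_reverse _).symm
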